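-- pv_equiv track=rewrite | github.com/Rushali-Sarkar/python | PythonFiles/hackerrank/team.py | findmax
-- ===== SOURCE A (Python) =====
-- def findmax(knowntopics: [int]) -> (int, int):
--     maximum = []
--
--     for index, each in enumerate(knowntopics):
--         for element in knowntopics[index + 1:]:
--             together = list(set(each + element))
--             maximum.append(len(together))
--
--     maximum = sorted(maximum)
--     return maximum[-1], maximum.count(maximum[-1])
-- ===== SOURCE B (Python) =====
-- def findmax(knowntopics):
--     best = 0
--     best_count = 0
--     for index, each in enumerate(knowntopics):
--         for element in knowntopics[index + 1:]:
--             size = len(set(each + element))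
--             if size > best:
--                 best, best_count = size, 1
--             elif size == best:
--                 best_count += 1
--     return best, best_count
-- ===== Notes on version B (the rewrite author's own statement) =====
-- stated objective: simpler
-- what changed: Instead of collecting every pair's union size into a list, sorting it and counting the last element, B keeps a running best/best_count pair updated in one pass over the same pairs, so no list is built and no sort is performed; Pre_ excludes inputs with fewer than two topic lists, on which A raises IndexError indexing an empty list.
import Mathlib
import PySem

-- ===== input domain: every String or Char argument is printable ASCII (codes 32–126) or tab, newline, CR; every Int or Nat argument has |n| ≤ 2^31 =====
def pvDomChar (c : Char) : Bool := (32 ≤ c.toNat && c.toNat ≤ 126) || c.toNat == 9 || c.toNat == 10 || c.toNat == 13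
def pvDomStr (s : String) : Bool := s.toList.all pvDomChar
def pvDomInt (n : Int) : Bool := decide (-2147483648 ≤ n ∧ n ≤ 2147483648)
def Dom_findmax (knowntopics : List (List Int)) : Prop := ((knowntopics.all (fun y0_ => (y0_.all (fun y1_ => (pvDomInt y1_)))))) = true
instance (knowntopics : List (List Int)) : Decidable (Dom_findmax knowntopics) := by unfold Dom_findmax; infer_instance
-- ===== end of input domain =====

-- B replaces A's collect-all-sizes list + sort + count with a single running (best, best_count)
-- pass over the same pairs (objective: simpler). Return-value equivalence only; neither mutates.

-- ===== PORT A =====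
def findmax (knowntopics : List (List Int)) : Int × Int :=
  let maximum : List Int :=
    (PySem.List.enumerate knowntopics 0).foldl (fun acc p =>
      (PySem.List.slice knowntopics (some (p.1 + 1)) none).foldl (fun acc2 element =>
        acc2 ++ [(((PySem.Set.ofList (p.2 ++ element)).length : Nat) : Int)]) acc) []
  let m := PySem.List.sorted maximum (fun x => x) false
  let last := (PySem.List.pyGet? m (-1)).getD 0   -- none = IndexError, excluded by Pre_
  (last, ((m.count last : Nat) : Int))

-- ===== PORT B =====
def pvStepB (st : Int × Int) (size : Int) : Int × Int :=
  if size > st.1 then (size, 1)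
  else if size == st.1 then (st.1, st.2 + 1) else st

def findmax_alt (knowntopics : List (List Int)) : Int × Int :=
  (PySem.List.enumerate knowntopics 0).foldl (fun st p =>
    (PySem.List.slice knowntopics (some (p.1 + 1)) none).foldl (fun st element =>
      pvStepB st (((PySem.Set.ofList (p.2 ++ element)).length : Nat) : Int)) st)
    ((0 : Int), (0 : Int))

-- ===== PRECONDITION & SPEC =====
-- Pre_ excludes inputs with fewer than two topic lists, on which A raises IndexError
-- (maximum[-1] on an empty list); B's one-pass scan simply returns (0, 0) there.
def Pre_findmax (knowntopics : List (List Int)) : Prop := 2 ≤ knowntopics.length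
instance (knowntopics : List (List Int)) : Decidable (Pre_findmax knowntopics) := by unfold Pre_findmax; infer_instance
def pvWitness_findmax : List (List Int) := [[1, 2], [2, 3], [1]]

def Spec_findmax (knowntopics : List (List Int)) (out : Int × Int) : Prop := out = findmax_alt knowntopics
instance (knowntopics : List (List Int)) (out : Int × Int) : Decidable (Spec_findmax knowntopics out) := by unfold Spec_findmax; infer_instance

-- ===== CLAIM (what is proved, stated in full; the proofs are below) =====
def Claim_equal_findmax : Prop := ∀ (knowntopics : List (List Int)), Dom_findmax knowntopics → Pre_findmax knowntopics → Spec_findmax knowntopics (findmax knowntopics)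

-- ===== LEMMAS AND PROOFS =====

-- the list of pair union-sizes both programs range over, in traversal order
def pvSizes (knowntopics : List (List Int)) : List Int :=
  (PySem.List.enumerate knowntopics 0).flatMap (fun p =>
    (PySem.List.slice knowntopics (some (p.1 + 1)) none).map (fun element =>
      (((PySem.Set.ofList (p.2 ++ element)).length : Nat) : Int)))

-- A's accumulated list is pvSizes
theorem pvA_maximum (knowntopics : List (List Int)) :
    (PySem.List.enumerate knowntopics 0).foldl (fun acc p =>
      (PySem.List.slice knowntopics (some (p.1 + 1)) none).foldl (fun acc2 element =>
        acc2 ++ [(((PySem.Set.ofList (p.2 ++ element)).length : Nat) : Int)]) acc) []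
    = pvSizes knowntopics := by
  unfold pvSizes
  generalize PySem.List.enumerate knowntopics 0 = L
  suffices h : ∀ (acc : List Int), L.foldl (fun acc p =>
      (PySem.List.slice knowntopics (some (p.1 + 1)) none).foldl (fun acc2 element =>
        acc2 ++ [(((PySem.Set.ofList (p.2 ++ element)).length : Nat) : Int)]) acc) acc
      = acc ++ L.flatMap (fun p =>
        (PySem.List.slice knowntopics (some (p.1 + 1)) none).map (fun element =>
          (((PySem.Set.ofList (p.2 ++ element)).length : Nat) : Int))) by
    simpa using h []
  induction L with
  | nil => simp
  | cons p L ih =>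
    intro acc
    simp only [List.foldl_cons, List.flatMap_cons, PySem.List.foldl_append_singleton_eq_map]
    simp [List.flatMap_def, List.append_assoc]

-- B's nested fold is a fold of pvStepB over pvSizes
theorem pvB_fold (knowntopics : List (List Int)) (s : Int × Int) :
    (PySem.List.enumerate knowntopics 0).foldl (fun st p =>
      (PySem.List.slice knowntopics (some (p.1 + 1)) none).foldl (fun st element =>
        pvStepB st (((PySem.Set.ofList (p.2 ++ element)).length : Nat) : Int)) st) s
    = (pvSizes knowntopics).foldl pvStepB s := by
  unfold pvSizes
  generalize PySem.List.enumerate knowntopics 0 = L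
  induction L generalizing s with
  | nil => simp
  | cons p L ih =>
    simp only [List.foldl_cons, List.flatMap_cons, List.foldl_append, ← ih,
      List.foldl_map]

-- every pair union-size is nonnegative (it is a Nat cast)
theorem pvSizes_nonneg (knowntopics : List (List Int)) :
    ∀ x ∈ pvSizes knowntopics, 0 ≤ x := by
  intro x hx
  unfold pvSizes at hx
  obtain ⟨p, _, hx⟩ := List.mem_flatMap.mp hx
  obtain ⟨e, _, rfl⟩ := List.mem_map.mp hx
  positivity

-- running-max fold characterisation
theorem pvStepB_foldl (L : List Int) : ∀ (b c : Int),
    L.foldl pvStepB (b, c)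
    = (L.foldl max b,
       (if b = L.foldl max b then c else 0) + (L.count (L.foldl max b) : Int)) := by
  induction L with
  | nil => intro b c; simp
  | cons x L ih =>
    intro b c
    rw [List.foldl_cons, List.foldl_cons]
    rcases lt_trichotomy b x with h | h | h
    · have h1 : pvStepB (b, c) x = (x, 1) := by
        simp [pvStepB, h]
      rw [h1, ih, max_eq_right h.le]
      have hxm := (PySem.List.le_foldl_max L x).1
      refine Prod.ext rfl ?_
      rw [List.count_cons]
      simp only [beq_iff_eq]
      split_ifs <;> push_cast <;> omega
    · subst h
      have h1 : pvStepB (b, c) b = (b, c + 1) := by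
        simp [pvStepB]
      rw [h1, ih, max_self]
      refine Prod.ext rfl ?_
      rw [List.count_cons]
      simp only [beq_iff_eq]
      split_ifs <;> push_cast <;> omega
    · have h1 : pvStepB (b, c) x = (b, c) := by
        simp [pvStepB, show ¬ x > b by omega, show x ≠ b by omega]
      rw [h1, ih, max_eq_left h.le]
      have hbm := (PySem.List.le_foldl_max L b).1
      refine Prod.ext rfl ?_
      rw [List.count_cons]
      simp only [beq_iff_eq]
      split_ifs <;> push_cast <;> omega

theorem pv_foldl_max_mem (L : List Int) : ∀ (b : Int), L.foldl max b = b ∨ L.foldl max b ∈ L := by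
  induction L with
  | nil => intro b; simp
  | cons x L ih =>
    intro b
    simp only [List.foldl_cons]
    rcases ih (max b x) with h | h
    · rcases max_choice b x with hm | hm <;> rw [hm] at h ⊢ <;> simp [h]
    · simp [h]

theorem pv_pairwise_le_getLast {L : List Int} (hp : L.Pairwise (· ≤ ·)) (hne : L ≠ [])
    {x : Int} (hx : x ∈ L) : x ≤ L.getLast hne := by
  induction L with
  | nil => simp at hx
  | cons a L ih =>
    rcases List.eq_nil_or_concat L with h | _
    · subst h; simp at hx; simp [hx]
    · have hLne : L ≠ [] := by rintro rfl; simp_all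
      rw [List.getLast_cons hLne]
      rcases List.mem_cons.mp hx with rfl | hx'
      · exact (List.pairwise_cons.mp hp).1 _ (List.getLast_mem hLne)
      · exact ih (List.pairwise_cons.mp hp).2 hLne hx'

-- pvSizes is nonempty when there are at least two topic lists
theorem pvSizes_ne_nil {knowntopics : List (List Int)} (h : 2 ≤ knowntopics.length) :
    pvSizes knowntopics ≠ [] := by
  match knowntopics, h with
  | a :: b :: rest, _ =>
    unfold pvSizes
    simp only [PySem.List.enumerate_cons, List.flatMap_cons]
    have h1 : PySem.List.slice (a :: b :: rest) (some (1:Int)) none = b :: rest := by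
      rw [PySem.List.slice_from _ (by omega : (0:Int) ≤ 1)]; rfl
    simp [h1]

-- ===== VERDICT (by name: the statement is the Claim_ definition above) =====
theorem findmax_spec : Claim_equal_findmax := by
  intro kt _ hpre
  unfold Spec_findmax findmax findmax_alt
  rw [pvA_maximum, pvB_fold]
  obtain ⟨a, rest, hS⟩ := List.exists_cons_of_ne_nil (pvSizes_ne_nil hpre)
  have ha : 0 ≤ a := pvSizes_nonneg kt a (by rw [hS]; simp)
  rw [hS]
  have hstep : pvStepB ((0 : Int), (0 : Int)) a = (a, 1) := by
    rcases lt_or_eq_of_le ha with h | h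
    · simp [pvStepB, h]
    · simp [pvStepB, ← h]
  rw [List.foldl_cons, hstep, pvStepB_foldl]
  set M := rest.foldl max a with hM
  -- A's side
  have hsne : PySem.List.sorted (a :: rest) (fun x => x) false ≠ [] := by
    simp [PySem.List.sorted_eq_nil_iff]
  have hperm : (PySem.List.sorted (a :: rest) (fun x => x) false).Perm (a :: rest) :=
    PySem.List.sorted_perm _ _ _
  have hpw : (PySem.List.sorted (a :: rest) (fun x => x) false).Pairwise (· ≤ ·) := by
    have := PySem.List.sorted_pairwise (xs := a :: rest) (key := fun x : Int => x)
    simpa using this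
  have hMmem : M ∈ a :: rest := by
    rcases pv_foldl_max_mem rest a with h | h
    · rw [hM, h]; simp
    · exact List.mem_cons_of_mem _ h
  have hlast_eq : (PySem.List.sorted (a :: rest) (fun x => x) false).getLast hsne = M := by
    have h1 : (PySem.List.sorted (a :: rest) (fun x => x) false).getLast hsne ≤ M := by
      have hmem : (PySem.List.sorted (a :: rest) (fun x => x) false).getLast hsne ∈ a :: rest :=
        hperm.mem_iff.mp (List.getLast_mem hsne)
      rcases List.mem_cons.mp hmem with h | h
      · rw [h]; exact (PySem.List.le_foldl_max rest a).1
      · exact (PySem.List.le_foldl_max rest a).2 _ h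
    have h2 : M ≤ (PySem.List.sorted (a :: rest) (fun x => x) false).getLast hsne :=
      pv_pairwise_le_getLast hpw hsne (hperm.mem_iff.mpr hMmem)
    omega
  have hget : PySem.List.pyGet? (PySem.List.sorted (a :: rest) (fun x => x) false) (-1)
      = some M := by
    rw [PySem.List.pyGet?_neg_one, List.getLast?_eq_some_getLast hsne, hlast_eq]
  simp only [hget, Option.getD_some]
  refine Prod.ext rfl ?_
  have hc := hperm.count_eq M
  simp only [hc, List.count_cons, beq_iff_eq]
  split_ifs <;> push_cast <;> omega
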